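-- pv_equiv track=rewrite | github.com/elvis-gene/coding-practice | binarysearch.com/consecutive_ones.py | solve
-- ===== SOURCE A (Python) =====
-- def solve(nums):
--
--     num_ones = nums.count(1)
--
--     # [1, 1, 0, 1, 1]
--
--     count = 0
--
--     for num in nums:
--         if num == 1:
--             count = count + 1
--
--             if count == num_ones:
--                 return True
--
--         elif num != 1 and count > 0:
--             count = count - 1
--
--     return False
-- ===== SOURCE B (Python) =====
-- def solve(nums):
--     # True iff the array contains at least one 1 and all its 1s are contiguous:
--     # the number of 1s must equal the span between the first and last 1.
--     if 1 not in nums: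
--         return False
--     first = nums.index(1)
--     last = len(nums) - 1 - nums[::-1].index(1)
--     return nums.count(1) == last - first + 1
-- ===== Notes on version B (the rewrite author's own statement) =====
-- stated objective: simpler
-- what changed: Replaces A's running-balance scan with early return by a boundary-span check: the ones are contiguous iff count(1) equals last-first+1, with first/last found via index(1) on the list and its reversal.
import Mathlib
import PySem

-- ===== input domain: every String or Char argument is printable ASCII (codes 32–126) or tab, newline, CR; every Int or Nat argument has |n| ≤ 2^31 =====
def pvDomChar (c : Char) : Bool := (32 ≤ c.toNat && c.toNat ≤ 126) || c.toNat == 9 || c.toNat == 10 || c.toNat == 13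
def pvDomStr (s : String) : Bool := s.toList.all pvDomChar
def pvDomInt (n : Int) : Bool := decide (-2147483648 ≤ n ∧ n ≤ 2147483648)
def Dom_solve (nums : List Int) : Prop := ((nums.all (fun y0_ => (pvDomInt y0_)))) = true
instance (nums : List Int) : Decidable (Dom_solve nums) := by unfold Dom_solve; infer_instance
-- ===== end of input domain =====

-- B replaces A's running-balance scan with a first/last-position span check (objective: simpler).

-- ===== PORT A =====
-- the for-loop with its early 'return True'; state = count
def solveGo (numOnes : Int) (count : Int) : List Int → Bool
  | [] => false
  | num :: rest =>
    if num = 1 then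
      if count + 1 = numOnes then true else solveGo numOnes (count + 1) rest
    else if num ≠ 1 ∧ count > 0 then solveGo numOnes (count - 1) rest
    else solveGo numOnes count rest

def solve (nums : List Int) : Bool :=
  solveGo ((PySem.List.count nums 1 : Int)) 0 nums

-- ===== PORT B =====
-- nums[::-1] is ported as List.reverse (exact: PySem.List.slice?_none_none_neg_one);
-- the guarded .index(1) calls are ported with index?, whose 'none' case is unreachable under the guard.
def solve_alt (nums : List Int) : Bool :=
  if nums.contains 1 then
    match PySem.List.index? nums 1, PySem.List.index? nums.reverse 1 with
    | some f, some r =>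
      let last : Int := (nums.length : Int) - 1 - (r : Int)
      decide ((PySem.List.count nums 1 : Int) = last - (f : Int) + 1)
    | _, _ => false
  else false

-- ===== PRECONDITION & SPEC =====
def Spec_solve (nums : List Int) (out : Bool) : Prop := out = solve_alt nums
instance (nums : List Int) (out : Bool) : Decidable (Spec_solve nums out) := by unfold Spec_solve; infer_instance

-- ===== CLAIM (what is proved, stated in full; the proofs are below) =====
def Claim_equal_solve : Prop := ∀ (nums : List Int), Dom_solve nums → Spec_solve nums (solve nums)

-- ===== LEMMAS AND PROOFS =====

theorem count1_cons_ne (x : Int) (r : List Int) (hx : x ≠ 1) :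
    List.count 1 (x :: r) = List.count 1 r := by simp [hx]

theorem solveGo_cons_one (N c : Int) (r : List Int) :
    solveGo N c (1 :: r) = if c + 1 = N then true else solveGo N (c + 1) r := by
  simp [solveGo]

theorem solveGo_cons_ne (N c x : Int) (r : List Int) (hx : x ≠ 1) :
    solveGo N c (x :: r) = if c > 0 then solveGo N (c - 1) r else solveGo N c r := by
  by_cases hc : c > 0 <;> simp [solveGo, hx, hc]

-- once the running balance can no longer reach numOnes, the loop returns False
theorem solveGo_fail (l : List Int) : ∀ (N c : Int), c + (l.count 1 : Int) < N →
    solveGo N c l = false := by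
  induction l with
  | nil => intro N c h; simp [solveGo]
  | cons x r ih =>
    intro N c h
    by_cases hx : x = 1
    · subst hx
      rw [List.count_cons_self] at h
      push_cast at h
      rw [solveGo_cons_one, if_neg (by omega : ¬ c + 1 = N)]
      exact ih N (c+1) (by omega)
    · rw [count1_cons_ne x r hx] at h
      rw [solveGo_cons_ne N c x r hx]
      by_cases hc : c > 0
      · rw [if_pos hc]; exact ih N (c-1) (by omega)
      · rw [if_neg hc]; exact ih N c (by omega)

-- no 1 anywhere: the loop never reaches its 'return True'
theorem solveGo_noones (l : List Int) (N : Int) : ∀ (c : Int), l.count 1 = 0 →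
    solveGo N c l = false := by
  induction l with
  | nil => intro c _; simp [solveGo]
  | cons x r ih =>
    intro c h
    have hx : x ≠ 1 := by rintro rfl; rw [List.count_cons_self] at h; omega
    rw [count1_cons_ne x r hx] at h
    rw [solveGo_cons_ne N c x r hx]
    by_cases hc : c > 0
    · rw [if_pos hc]; exact ih _ h
    · rw [if_neg hc]; exact ih _ h

-- leading non-1s are skipped with count staying 0
theorem solveGo_skip (pre : List Int) : ∀ (l : List Int) (N : Int), pre.count 1 = 0 →
    solveGo N 0 (pre ++ l) = solveGo N 0 l := by
  induction pre with
  | nil => intro l N _; rfl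
  | cons x p ih =>
    intro l N h
    have hx : x ≠ 1 := by rintro rfl; rw [List.count_cons_self] at h; omega
    rw [count1_cons_ne x p hx] at h
    rw [List.cons_append, solveGo_cons_ne N 0 x (p ++ l) hx, if_neg (by omega : ¬ (0:Int) > 0)]
    exact ih l N h

-- inside the run of ones: succeeds iff no 1 remains after the run
theorem solveGo_run (l : List Int) : ∀ (c N : Int), 1 ≤ c →
    N = c + (l.count 1 : Int) → 1 ≤ l.count 1 →
    solveGo N c l = decide ((l.dropWhile (fun x => x == 1)).count 1 = 0) := by
  induction l with
  | nil => intro c N _ _ h1; simp at h1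
  | cons x r ih =>
    intro c N hc hN h1
    by_cases hx : x = 1
    · subst hx
      rw [List.count_cons_self] at hN
      rw [List.dropWhile_cons_of_pos (by simp), solveGo_cons_one]
      by_cases hr : r.count 1 = 0
      · rw [if_pos (by push_cast at hN ⊢; omega)]
        have hle : (r.dropWhile (fun x => x == (1:Int))).count 1 ≤ r.count 1 :=
          (List.dropWhile_sublist _).count_le _
        have : (r.dropWhile (fun x => x == (1:Int))).count 1 = 0 := by omega
        simp [this]
      · rw [if_neg (by push_cast at hN ⊢; omega : ¬ c + 1 = N)]
        exact ih (c+1) N (by omega) (by push_cast at hN ⊢; omega) (by omega)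
    · rw [count1_cons_ne x r hx] at hN h1
      rw [solveGo_cons_ne N c x r hx, if_pos (by omega : c > 0),
        solveGo_fail r N (c-1) (by omega),
        List.dropWhile_cons_of_neg (by simp [hx]), count1_cons_ne x _ hx]
      simp only [false_eq_decide_iff]
      omega

-- characterisation of A at the first 1: True iff no 1 survives past the leading run of ones
theorem solve_char (pre suf : List Int) (h : pre.count 1 = 0) :
    solve (pre ++ 1 :: suf) = decide ((suf.dropWhile (fun x => x == 1)).count 1 = 0) := by
  unfold solve
  rw [PySem.List.count_eq, List.count_append, h, List.count_cons_self,
    solveGo_skip pre (1 :: suf) _ h, solveGo_cons_one]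
  by_cases hs : suf.count 1 = 0
  · rw [if_pos (by push_cast; omega)]
    have hle : (suf.dropWhile (fun x => x == (1:Int))).count 1 ≤ suf.count 1 :=
      (List.dropWhile_sublist _).count_le _
    simp [show (suf.dropWhile (fun x => x == (1:Int))).count 1 = 0 from by omega]
  · rw [if_neg (by push_cast; omega)]
    exact solveGo_run suf 1 _ (le_refl 1) (by push_cast; omega) (by omega)

theorem dropWhile_all_ones (mid : List Int) : ∀ (post : List Int), (∀ x ∈ mid, x = 1) →
    ((mid ++ 1 :: post).dropWhile (fun x => x == 1)) = post.dropWhile (fun x => x == 1) := by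
  induction mid with
  | nil => intro post _; simp
  | cons x m ih =>
    intro post h
    have hx : x = 1 := h x (by simp)
    subst hx
    rw [List.cons_append, List.dropWhile_cons_of_pos (by simp)]
    exact ih post (fun y hy => h y (by simp [hy]))

theorem dropWhile_not_all_ones (mid : List Int) : ∀ (post : List Int), (∃ x ∈ mid, x ≠ 1) →
    (1 : Int) ∈ ((mid ++ 1 :: post).dropWhile (fun x => x == 1)) := by
  induction mid with
  | nil => rintro post ⟨x, hx, -⟩; simp at hx
  | cons y m ih =>
    rintro post ⟨x, hx, hx1⟩
    by_cases hy : y = 1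
    · subst hy
      rw [List.cons_append, List.dropWhile_cons_of_pos (by simp)]
      have hxm : x ∈ m := (List.mem_cons.mp hx).resolve_left hx1
      exact ih post ⟨x, hxm, hx1⟩
    · rw [List.cons_append, List.dropWhile_cons_of_neg (by simp [hy])]
      simp

-- ===== VERDICT (by name: the statement is the Claim_ definition above) =====
theorem count1_eq_length_of_span (nums pre suf t post : List Int) (f r : Nat)
    (hn1 : nums = pre ++ 1 :: suf) (hn2 : nums = t ++ 1 :: post)
    (hpre0 : pre.count 1 = 0) (hpost0 : post.count 1 = 0)
    (hlen1 : pre.length = f) (hlenr : post.length = r) :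
    solve nums = decide (((nums.count 1 : Nat) : Int) =
      ((nums.length : Int) - 1 - (r : Int)) - (f : Int) + 1) := by
  have hft : f ≤ t.length := by
    by_contra hcon
    push Not at hcon
    have h1t : nums[t.length]? = some 1 := by
      rw [hn2, List.getElem?_append_right (Nat.le_refl _)]
      simp
    have hpt : nums[t.length]? = pre[t.length]? := by
      rw [hn1]
      exact List.getElem?_append_left (by omega)
    have : (1:Int) ∈ pre := List.mem_of_getElem? (hpt.symm.trans h1t)
    rw [List.count_eq_zero] at hpre0
    exact hpre0 this
  rcases Nat.lt_or_ge f t.length with hlt | hge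
  · -- first 1 strictly before last 1: suf = mid ++ 1 :: post
    have hsuf : nums.drop (f + 1) = suf := by
      rw [hn1, show pre ++ 1 :: suf = (pre ++ [1]) ++ suf by simp]
      exact List.drop_left' (by simp [hlen1])
    have h1post : nums.drop t.length = 1 :: post := by
      rw [hn2]
      exact List.drop_left' rfl
    set d := t.length - (f + 1) with hd
    set mid := (nums.drop (f + 1)).take d with hmid
    have hsplit : suf = mid ++ 1 :: post := by
      calc suf = (nums.drop (f+1)).take d ++ (nums.drop (f+1)).drop d := by
                  rw [List.take_append_drop, hsuf]
        _ = mid ++ 1 :: post := by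
                  rw [List.drop_drop, show f + 1 + d = t.length by omega, h1post]
    have hsufcnt : suf.count 1 = mid.count 1 + 1 := by
      rw [hsplit, List.count_append, List.count_cons_self, hpost0]
    have hcnt : nums.count 1 = mid.count 1 + 2 := by
      rw [hn1, List.count_append, hpre0, List.count_cons_self, hsufcnt]
      omega
    have hlen : nums.length = f + 1 + (mid.length + 1 + post.length) := by
      rw [hn1, hsplit]
      simp [hlen1]
      omega
    rw [hn1, solve_char pre suf hpre0, ← hn1, hsplit, decide_eq_decide]
    constructor
    · intro h0
      have hall : ∀ x ∈ mid, x = 1 := by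
        by_contra hcon
        push Not at hcon
        have hmem := dropWhile_not_all_ones mid post hcon
        have := List.count_pos_iff.mpr hmem
        omega
      have hcl : mid.count 1 = mid.length :=
        List.count_eq_length.mpr (fun b hb => (hall b hb).symm)
      rw [hcnt, hlen]
      push_cast
      omega
    · intro harith
      rw [hcnt, hlen] at harith
      push_cast at harith
      have hcl : mid.count 1 = mid.length := by omega
      have hall : ∀ x ∈ mid, x = 1 := fun b hb => (List.count_eq_length.mp hcl b hb).symm
      rw [dropWhile_all_ones mid post hall]
      have hle : (post.dropWhile (fun x => x == (1:Int))).count 1 ≤ post.count 1 :=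
        (List.dropWhile_sublist _).count_le _
      omega
  · -- the first and the last 1 coincide: exactly one 1
    have hfeq : f = t.length := le_antisymm (by omega) hge
    obtain ⟨hpt, hsp⟩ := List.append_inj (hn1.symm.trans hn2) (by omega)
    have hsufpost : suf = post := by injection hsp
    have hsuf0 : suf.count 1 = 0 := hsufpost ▸ hpost0
    have hcnt : nums.count 1 = 1 := by
      rw [hn1, List.count_append, hpre0, List.count_cons_self, hsuf0]
    have hlen : nums.length = f + 1 + r := by
      rw [hn1, hsufpost]
      simp [hlen1, hlenr]
      omega
    rw [hn1, solve_char pre suf hpre0, ← hn1]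
    have hle : (suf.dropWhile (fun x => x == (1:Int))).count 1 ≤ suf.count 1 :=
      (List.dropWhile_sublist _).count_le _
    rw [decide_eq_decide]
    constructor
    · intro _
      rw [hcnt, hlen]
      push_cast
      omega
    · intro _
      omega

-- ===== VERDICT (by name: the statement is the Claim_ definition above) =====
theorem solve_spec : Claim_equal_solve := by
  intro nums _
  unfold Spec_solve solve_alt
  by_cases h1 : (1:Int) ∈ nums
  · obtain ⟨f, hf⟩ : ∃ f, PySem.List.index? nums 1 = some f :=
      Option.isSome_iff_exists.mp ((PySem.List.index?_isSome_iff (xs := nums) (v := 1)).mpr h1)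
    obtain ⟨r, hr⟩ : ∃ r, PySem.List.index? nums.reverse 1 = some r :=
      Option.isSome_iff_exists.mp
        ((PySem.List.index?_isSome_iff (xs := nums.reverse) (v := 1)).mpr (by simpa using h1))
    rw [if_pos (by simpa using h1), hf, hr]
    obtain ⟨pre, suf, hn1, hlen1, hnot1⟩ := (PySem.List.index?_eq_some_iff nums 1 f).mp hf
    obtain ⟨rp, rs, hn2, hlen2, hnot2⟩ := (PySem.List.index?_eq_some_iff nums.reverse 1 r).mp hr
    have hnums2 : nums = rs.reverse ++ 1 :: rp.reverse := by
      have := congrArg List.reverse hn2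
      simpa using this
    have hpre0 : pre.count 1 = 0 := List.count_eq_zero.mpr hnot1
    have hpost0 : (rp.reverse).count 1 = 0 := List.count_eq_zero.mpr (by simpa using hnot2)
    rw [PySem.List.count_eq]
    exact count1_eq_length_of_span nums pre suf rs.reverse rp.reverse f r
      hn1 hnums2 hpre0 hpost0 hlen1 (by simpa using hlen2)
  · rw [if_neg (by simpa using h1)]
    have hc : nums.count 1 = 0 := List.count_eq_zero.mpr h1
    unfold solve
    rw [PySem.List.count_eq]
    exact solveGo_noones nums _ 0 hc
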